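-- pv_equiv track=rewrite | github.com/Dayotar/App-Acad | Practice_1.py | nearby
-- ===== SOURCE A (Python) =====
-- def nearby(string):
--
--     count = 0
--     for letter in string:
--         if letter == "a":
--             if "z" in string[count: count + 3]:
--                 return True
--         count += 1
--     return False
-- ===== SOURCE B (Python) =====
-- import re
--
-- _NEARBY_RE = re.compile(r"a[\s\S]?z")
--
-- def nearby(string):
--     return bool(_NEARBY_RE.search(string))
-- ===== Notes on version B (the rewrite author's own statement) =====
-- stated objective: idiomatic
-- what changed: Replaces the manual index-counting loop that slices the string at every position with a single compiled regular-expression search for the pattern a[\s\S]?z.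
import Mathlib
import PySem

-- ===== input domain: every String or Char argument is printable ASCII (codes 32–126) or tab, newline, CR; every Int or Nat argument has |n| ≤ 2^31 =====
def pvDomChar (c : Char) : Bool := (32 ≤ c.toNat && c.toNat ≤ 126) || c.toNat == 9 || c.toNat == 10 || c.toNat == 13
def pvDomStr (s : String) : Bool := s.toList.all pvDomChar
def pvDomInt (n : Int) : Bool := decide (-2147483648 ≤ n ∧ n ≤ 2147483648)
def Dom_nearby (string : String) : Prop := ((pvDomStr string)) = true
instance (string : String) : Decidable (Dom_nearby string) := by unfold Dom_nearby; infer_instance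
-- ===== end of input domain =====

-- B is an idiomatic regex re-implementation (re.search(r"a[\s\S]?z")); equivalence of return values is proved on all strings.

-- ===== PORT A =====
-- A's loop: for each letter with running index `count`, if letter == 'a' and 'z' is in string[count:count+3], return True.
def nearbyGo (s : List Char) : List Char → Nat → Bool
  | [], _ => false
  | letter :: rest, count =>
    if letter = 'a' then
      if (PySem.List.slice s (some (count : Int)) (some ((count : Int) + 3))).contains 'z' then
        true
      else
        nearbyGo s rest (count + 1)
    else
      nearbyGo s rest (count + 1)

def nearby (string : String) : Bool := nearbyGo string.toList string.toList 0

-- ===== PORT B =====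
-- Regex matcher for the pattern a[\s\S]?z at the current position: 'a', optionally one arbitrary char, then 'z'.
def reHere : List Char → Bool
  | a :: rest =>
    a == 'a' &&
      (match rest with
       | z :: rest2 => z == 'z' || (match rest2 with | z2 :: _ => z2 == 'z' | [] => false)
       | [] => false)
  | [] => false

-- re.search: try the pattern at every position.
def reSearch : List Char → Bool
  | [] => false
  | c :: rest => reHere (c :: rest) || reSearch rest

def nearby_alt (string : String) : Bool := reSearch string.toList

-- ===== PRECONDITION & SPEC =====
def Spec_nearby (string : String) (out : Bool) : Prop := out = nearby_alt string
instance (string : String) (out : Bool) : Decidable (Spec_nearby string out) := by unfold Spec_nearby; infer_instance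

-- ===== CLAIM (what is proved, stated in full; the proofs are below) =====
def Claim_equal_nearby : Prop := ∀ (string : String), Dom_nearby string → Spec_nearby string (nearby string)

-- ===== LEMMAS AND PROOFS =====

theorem reHere_a (rest : List Char) :
    reHere ('a' :: rest) = (rest.take 2).contains 'z' := by
  match rest with
  | [] => rfl
  | [z] =>
    simp [reHere, Bool.beq_eq_decide_eq]
    exact eq_comm
  | z :: z2 :: rest3 =>
    simp [reHere, Bool.beq_eq_decide_eq]
    rw [show decide (z = 'z') = decide ('z' = z) from decide_eq_decide.mpr eq_comm,
        show decide (z2 = 'z') = decide ('z' = z2) from decide_eq_decide.mpr eq_comm]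

theorem reHere_not_a (c : Char) (rest : List Char) (h : c ≠ 'a') :
    reHere (c :: rest) = false := by
  simp [reHere, h]

theorem nearbyGo_eq_reSearch (s : List Char) :
    ∀ (t : List Char) (count : Nat), s.drop count = t → nearbyGo s t count = reSearch t := by
  intro t
  induction t with
  | nil => intro count _; rfl
  | cons c rest ih =>
    intro count hdrop
    have hslice : PySem.List.slice s (some (count : Int)) (some ((count : Int) + 3))
        = (s.drop count).take 3 := by
      have := PySem.List.slice_natCast_add (xs := s) (j := count) (n := 3)
      simpa using this
    have hdrop' : s.drop (count + 1) = rest := by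
      have h1 : s.drop (count + 1) = (s.drop count).drop 1 := by
        rw [List.drop_drop, Nat.add_comm]
      rw [h1, hdrop, List.drop_one, List.tail_cons]
    have hrec := ih (count + 1) hdrop'
    simp only [nearbyGo, hslice, hdrop, reSearch, hrec]
    by_cases ha : c = 'a'
    · subst ha
      rw [reHere_a, List.take_succ_cons, List.contains_cons]
      cases hb : (rest.take 2).contains 'z' <;> simp
    · rw [reHere_not_a c rest ha]
      simp [ha]

-- ===== VERDICT (by name: the statement is the Claim_ definition above) =====
theorem nearby_spec : Claim_equal_nearby := by
  intro string _
  unfold Spec_nearby nearby nearby_alt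
  exact nearbyGo_eq_reSearch string.toList string.toList 0 (by simp)
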